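-- pv_equiv track=rewrite | github.com/chaeheejo/algorithm | bigNumber.py | bigNumber
-- ===== SOURCE A (Python) =====
-- def bigNumber(n, m, k):
--     total=0
--     n.sort()
--     cnt=0
--
--     while cnt<m:
--         for i in range(k):
--             if cnt<m:
--                 total += n[-1]
--                 cnt+=1
--         if cnt < m:
--             total+=n[-2]
--             cnt+=1
--
--     return total
-- ===== SOURCE B (Python) =====
-- def bigNumber(n, m, k):
--     n.sort()
--     if m <= 0:
--         return 0
--     q, r = divmod(m, k + 1)
--     return (q * k + r) * n[-1] + q * n[-2]
-- ===== Notes on version B (the rewrite author's own statement) =====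
-- stated objective: simpler
-- what changed: Replaced A's O(m) simulation loop by the closed form q, r = divmod(m, k+1); (q*k+r)*max + q*second_max after the same in-place sort; Pre_ restricts to the natural domain (at least two elements, k >= 0, plus the trivial m <= 0 case), excluding negative k (where A's value m*second_max is an accident of range(k) being empty and B computes a different floor-division value) and one-element lists with 0 < m <= k (where A returns m*max without ever touching n[-2] but B's formula indexes n[-2] and raises).
-- outside the precondition, e.g. on bigNumber([1, 2], 3, -2): A returns 3, B returns 9; on bigNumber([5], 2, 3): A returns 10, B raises IndexError
import Mathlib
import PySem

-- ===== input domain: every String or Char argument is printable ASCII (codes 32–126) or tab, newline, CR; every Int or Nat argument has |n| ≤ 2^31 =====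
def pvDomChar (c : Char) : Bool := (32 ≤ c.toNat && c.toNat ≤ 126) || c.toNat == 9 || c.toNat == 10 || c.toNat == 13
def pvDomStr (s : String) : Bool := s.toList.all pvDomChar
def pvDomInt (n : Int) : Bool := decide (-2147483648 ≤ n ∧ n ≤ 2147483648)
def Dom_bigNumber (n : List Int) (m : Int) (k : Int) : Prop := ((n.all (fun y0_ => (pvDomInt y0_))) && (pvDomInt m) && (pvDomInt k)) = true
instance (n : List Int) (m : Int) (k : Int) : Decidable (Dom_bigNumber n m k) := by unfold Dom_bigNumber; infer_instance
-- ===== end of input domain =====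

-- B replaces A's O(m) simulation loop by a closed form after the same sort (both sort n in
-- place in Python; the equivalence proved here is about the return value).

-- ===== PORT A =====
-- the 'for i in range(k)' body
def bigNumberInner (s : List Int) (m k : Int) (p : Int × Int) : Int × Int :=
  (PySem.List.pyRange 0 k 1).foldl
    (fun q _ => if q.2 < m then (q.1 + PySem.List.pyGetD s (-1) 0, q.2 + 1) else q) p

-- the fold only ever increases the counter (needed for the while-loop's termination)
theorem bigNumberInner_snd_ge (s : List Int) (m k : Int) (p : Int × Int) :
    p.2 ≤ (bigNumberInner s m k p).2 := by
  unfold bigNumberInner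
  generalize PySem.List.pyRange 0 k 1 = l
  induction l generalizing p with
  | nil => simp
  | cons x xs ih =>
    simp only [List.foldl_cons]
    refine le_trans ?_ (ih _)
    split
    · simp
    · exact le_refl _

-- the 'while cnt < m' loop
def bigNumberLoop (s : List Int) (m k : Int) (total cnt : Int) : Int :=
  if h : cnt < m then
    let p := bigNumberInner s m k (total, cnt)
    if h2 : p.2 < m then bigNumberLoop s m k (p.1 + PySem.List.pyGetD s (-2) 0) (p.2 + 1)
    else p.1
  else total
termination_by (m - cnt).toNat
decreasing_by
  have := bigNumberInner_snd_ge s m k (total, cnt)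
  simp only at this
  omega

def bigNumber (n : List Int) (m : Int) (k : Int) : Int :=
  bigNumberLoop (PySem.List.sorted n (fun x => x) false) m k 0 0

-- ===== PORT B =====
def bigNumber_alt (n : List Int) (m : Int) (k : Int) : Int :=
  let s := PySem.List.sorted n (fun x => x) false
  if m ≤ 0 then 0
  else
    let q := PySem.Int.floordiv m (k + 1)
    let r := PySem.Int.mod m (k + 1)
    (q * k + r) * PySem.List.pyGetD s (-1) 0 + q * PySem.List.pyGetD s (-2) 0

-- ===== PRECONDITION & SPEC =====
-- Pre_ restricts to the natural domain (m ≤ 0, or a list with at least two elements and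
-- k ≥ 0): it excludes negative k, where A's value m*n[-2] is an accident of range(k) being
-- empty (B's floor division by k+1 ≤ 0 gives a different value, or raises at k = -1), and
-- one-element lists with 0 < m ≤ k, where A returns m*n[-1] but B's formula raises
-- IndexError on n[-2]; it also excludes the inputs where A itself raises IndexError
-- (m > 0 with an empty list, or with a one-element list reached by n[-2]).
def Pre_bigNumber (n : List Int) (m : Int) (k : Int) : Prop :=
  m ≤ 0 ∨ (2 ≤ n.length ∧ 0 ≤ k)
instance (n : List Int) (m : Int) (k : Int) : Decidable (Pre_bigNumber n m k) := by
  unfold Pre_bigNumber; infer_instance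

def pvWitness_bigNumber : List Int × Int × Int := ([3, 1, 2], 7, 2)

def Spec_bigNumber (n : List Int) (m : Int) (k : Int) (out : Int) : Prop := out = bigNumber_alt n m k
instance (n : List Int) (m : Int) (k : Int) (out : Int) : Decidable (Spec_bigNumber n m k out) := by unfold Spec_bigNumber; infer_instance

-- ===== CLAIM (what is proved, stated in full; the proofs are below) =====
def Claim_equal_bigNumber : Prop := ∀ (n : List Int) (m : Int) (k : Int), Dom_bigNumber n m k → Pre_bigNumber n m k → Spec_bigNumber n m k (bigNumber n m k)

-- ===== LEMMAS AND PROOFS =====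

-- the inner fold adds min(L, m-c) copies of s[-1] and advances the counter by the same amount
theorem inner_fold_char (s : List Int) (m : Int) (l : List Int) (t c : Int) (hc : c ≤ m) :
    (l.foldl (fun q (_ : Int) => if q.2 < m then (q.1 + PySem.List.pyGetD s (-1) 0, q.2 + 1) else q) (t, c)) =
      (t + min (l.length : Int) (m - c) * PySem.List.pyGetD s (-1) 0,
       c + min (l.length : Int) (m - c)) := by
  induction l generalizing t c with
  | nil => simp; omega
  | cons x xs ih =>
    simp only [List.foldl_cons, List.length_cons]
    by_cases h : c < m
    · simp only [h, if_pos]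
      rw [ih (t + PySem.List.pyGetD s (-1) 0) (c + 1) (by omega)]
      have hmin : min ((xs.length : Int) + 1) (m - c) = min (xs.length : Int) (m - (c + 1)) + 1 := by
        omega
      push_cast
      rw [hmin]
      refine Prod.ext ?_ ?_
      · simp only; ring
      · simp only; ring
    · simp only [h, if_false]
      rw [ih t c hc]
      have h1 : min ((xs.length : Int)) (m - c) = 0 := by omega
      have h2 : min (((xs.length : Int)) + 1) (m - c) = 0 := by omega
      push_cast
      rw [h1, h2]

theorem pyRange_len_int (k : Int) (hk : 0 < k) :
    ((PySem.List.pyRange 0 k 1).length : Int) = k := by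
  rw [PySem.List.length_pyRange_one]
  omega

-- closed form of the while loop for k ≥ 1
theorem loop_char_pos (s : List Int) (m k : Int) (hk : 1 ≤ k) (t c : Int) (hc : c ≤ m) :
    bigNumberLoop s m k t c =
      t + ((m - c) / (k + 1) * k + (m - c) % (k + 1)) * PySem.List.pyGetD s (-1) 0
        + (m - c) / (k + 1) * PySem.List.pyGetD s (-2) 0 := by
  generalize hd : (m - c).toNat = d
  induction d using Nat.strong_induction_on generalizing t c with
  | _ d ih =>
    rw [bigNumberLoop.eq_def]
    by_cases h : c < m
    · simp only [h, dif_pos]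
      have hinner : bigNumberInner s m k (t, c) =
          (t + min ((PySem.List.pyRange 0 k 1).length : Int) (m - c) * PySem.List.pyGetD s (-1) 0,
           c + min ((PySem.List.pyRange 0 k 1).length : Int) (m - c)) := by
        unfold bigNumberInner
        exact inner_fold_char s m _ t c hc
      rw [pyRange_len_int k (by omega)] at hinner
      by_cases hdk : m - c ≤ k
      · -- inner finishes the budget: cnt reaches m, loop exits
        have hmin : min k (m - c) = m - c := by omega
        have hq : (m - c) / (k + 1) = 0 := Int.ediv_eq_zero_of_lt (by omega) (by omega)
        have hr : (m - c) % (k + 1) = m - c := Int.emod_eq_of_lt (by omega) (by omega)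
        rw [hinner, hmin, dif_neg (show ¬ (c + (m - c) < m) by omega), hq, hr]
        ring
      · -- a full block: k maxes, then one second-max, and the loop continues
        have hmin : min k (m - c) = k := by omega
        rw [hinner, hmin]
        have h2 : c + k < m := by omega
        simp only [h2, dif_pos]
        have hlt : (m - (c + k + 1)).toNat < d := by omega
        have := ih _ hlt (t + k * PySem.List.pyGetD s (-1) 0 + PySem.List.pyGetD s (-2) 0)
          (c + k + 1) (by omega) rfl
        rw [this]
        have hsplit : m - c = (m - (c + k + 1)) + (k + 1) * 1 := by ring
        rw [hsplit, Int.add_mul_ediv_left _ _ (by omega : (k : Int) + 1 ≠ 0),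
            Int.add_mul_emod_self_left]
        ring
    · simp only [h, dite_eq_ite, if_false]
      have hc' : c = m := by omega
      subst hc'
      simp

-- closed form of the while loop for k = 0: each iteration adds exactly one second-max
theorem loop_char_zero (s : List Int) (m : Int) (t c : Int) (hc : c ≤ m) :
    bigNumberLoop s m 0 t c = t + (m - c) * PySem.List.pyGetD s (-2) 0 := by
  generalize hd : (m - c).toNat = d
  induction d using Nat.strong_induction_on generalizing t c with
  | _ d ih =>
    rw [bigNumberLoop.eq_def]
    by_cases h : c < m
    · simp only [h, dif_pos]
      have hinner : bigNumberInner s m 0 (t, c) = (t, c) := by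
        unfold bigNumberInner
        rw [PySem.List.pyRange_one_eq_nil (by omega)]
        rfl
      rw [hinner]
      simp only [h, dif_pos]
      have hlt : (m - (c + 1)).toNat < d := by omega
      rw [ih _ hlt (t + PySem.List.pyGetD s (-2) 0) (c + 1) (by omega) rfl]
      ring
    · have hc' : c = m := by omega
      subst hc'
      simp

-- ===== VERDICT (by name: the statement is the Claim_ definition above) =====
theorem bigNumber_spec : Claim_equal_bigNumber := by
  intro n m k _ hpre
  unfold Spec_bigNumber bigNumber bigNumber_alt
  set s := PySem.List.sorted n (fun x => x) false with hs
  by_cases hm : m ≤ 0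
  · simp only [hm, if_pos]
    rw [bigNumberLoop.eq_def]
    simp
    omega
  · simp only [hm, if_false]
    have hk0 : 0 ≤ k := by
      rcases hpre with h | ⟨_, h⟩
      · omega
      · exact h
    by_cases hk : 1 ≤ k
    · rw [loop_char_pos s m k hk 0 0 (by omega)]
      rw [PySem.Int.floordiv_eq_ediv_of_pos (by omega), PySem.Int.mod_eq_emod_of_pos (by omega)]
      rw [show m - 0 = m by ring]
      ring
    · have hkz : k = 0 := by omega
      subst hkz
      rw [loop_char_zero s m 0 0 (by omega)]
      rw [PySem.Int.floordiv_eq_ediv_of_pos (by omega), PySem.Int.mod_eq_emod_of_pos (by omega)]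
      simp
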